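-- pv_equiv track=rewrite | github.com/PangPangGod/Programmers_PY | Base_country_124.py | solution
-- ===== SOURCE A (Python) =====
-- def solution(n):
--     answer = []
--     while n>0:
--         if n%3 == 0 :
--             answer.append('4')
--             n = (n//3)-1
--         else :
--             answer.append(str(n%3))
--             n = n//3
--     return ''.join(answer[::-1])
-- ===== SOURCE B (Python) =====
-- def solution(n):
--     if n <= 0:
--         return ''
--     return solution((n - 1) // 3) + '124'[(n - 1) % 3]
-- ===== Notes on version B (the rewrite author's own statement) =====
-- stated objective: simpler
-- what changed: Replaces the while-loop with digit accumulator list, join and reversal by a three-line recursion on the bijective base-3 decomposition (n-1)//3 with a direct digit table '124'[(n-1)%3], emitting most-significant digit first so no reversal is needed.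
import Mathlib
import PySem

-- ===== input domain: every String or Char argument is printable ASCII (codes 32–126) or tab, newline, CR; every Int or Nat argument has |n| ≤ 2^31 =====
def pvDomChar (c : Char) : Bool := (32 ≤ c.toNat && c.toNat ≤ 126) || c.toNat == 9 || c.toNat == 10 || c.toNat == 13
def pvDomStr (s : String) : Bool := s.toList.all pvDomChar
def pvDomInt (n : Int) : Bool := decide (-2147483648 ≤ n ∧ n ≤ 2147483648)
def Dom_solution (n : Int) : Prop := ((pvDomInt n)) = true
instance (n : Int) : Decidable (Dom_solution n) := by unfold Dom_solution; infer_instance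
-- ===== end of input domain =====

-- B replaces the while-loop + accumulator + reversal by a direct recursion on (n-1)//3
-- with the digit table '124'[(n-1)%3]; objective: simpler (same asymptotic cost).

-- ===== PORT A =====
-- the while-loop: state is (n, answer); answer[::-1] (a full reverse slice) is ported as .reverse (exact)
def solutionLoop (n : Int) (answer : List String) : List String :=
  if 0 < n then
    if PySem.Int.mod n 3 = 0 then
      solutionLoop (PySem.Int.floordiv n 3 - 1) (answer ++ ["4"])
    else
      solutionLoop (PySem.Int.floordiv n 3) (answer ++ [PySem.Int.toStr (PySem.Int.mod n 3)])
  else answer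
termination_by n.toNat
decreasing_by
  · rw [PySem.Int.floordiv_eq_ediv_of_pos (by omega)]; omega
  · rw [PySem.Int.mod_eq_emod_of_pos (by omega)] at *
    rw [PySem.Int.floordiv_eq_ediv_of_pos (by omega)]; omega

def solution (n : Int) : String :=
  PySem.Str.join "" ((solutionLoop n []).reverse)

-- ===== PORT B =====
def solution_alt (n : Int) : String :=
  if n ≤ 0 then ""
  else solution_alt (PySem.Int.floordiv (n - 1) 3) ++
        (((PySem.Str.pyGet? "124" (PySem.Int.mod (n - 1) 3)).map (String.ofList [·])).getD "")
termination_by n.toNat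
decreasing_by
  rw [PySem.Int.floordiv_eq_ediv_of_pos (by omega)]; omega

-- ===== PRECONDITION & SPEC =====
def Spec_solution (n : Int) (out : String) : Prop := out = solution_alt n
instance (n : Int) (out : String) : Decidable (Spec_solution n out) := by unfold Spec_solution; infer_instance

-- ===== CLAIM (what is proved, stated in full; the proofs are below) =====
def Claim_equal_solution : Prop := ∀ (n : Int), Dom_solution n → Spec_solution n (solution n)

-- ===== LEMMAS AND PROOFS =====

-- the accumulator is only ever extended: loop n acc = acc ++ loop n []  (induction on a Nat bound for n)
theorem solutionLoop_acc_aux :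
    ∀ (k : Nat) (n : Int) (acc : List String), n.toNat ≤ k →
      solutionLoop n acc = acc ++ solutionLoop n [] := by
  intro k
  induction k with
  | zero =>
      intro n acc hk
      have hpos : ¬ 0 < n := by omega
      conv_lhs => rw [solutionLoop]
      conv_rhs => rw [solutionLoop]
      simp [if_neg hpos]
  | succ k ih =>
      intro n acc hk
      by_cases hpos : 0 < n
      · have hd : PySem.Int.floordiv n 3 = n / 3 := PySem.Int.floordiv_eq_ediv_of_pos (by omega)
        conv_lhs => rw [solutionLoop]
        conv_rhs => rw [solutionLoop]
        by_cases hmod : PySem.Int.mod n 3 = 0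
        · simp only [if_pos hpos, if_pos hmod]
          rw [ih _ (acc ++ ["4"]) (by rw [hd]; omega), ih _ ([] ++ ["4"]) (by rw [hd]; omega)]
          simp
        · simp only [if_pos hpos, if_neg hmod]
          rw [ih _ (acc ++ _) (by rw [hd]; omega), ih _ ([] ++ _) (by rw [hd]; omega)]
          simp
      · conv_lhs => rw [solutionLoop]
        conv_rhs => rw [solutionLoop]
        simp [if_neg hpos]

theorem intercalate_nil (l : List (List Char)) : List.intercalate [] l = l.flatten := by
  induction l with
  | nil => simp [List.intercalate]
  | cons x xs ih =>
      cases xs with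
      | nil => simp [List.intercalate]
      | cons y ys =>
          simp only [List.intercalate] at ih ⊢
          rw [List.intersperse_cons₂, List.flatten_cons, List.flatten_cons, ih]
          simp

theorem join_empty_append (xs ys : List String) :
    PySem.Str.join "" (xs ++ ys) = PySem.Str.join "" xs ++ PySem.Str.join "" ys := by
  apply String.toList_injective
  simp [PySem.Str.toList_join, PySem.Chars.join, intercalate_nil]

theorem main_aux :
    ∀ (k : Nat) (n : Int), n.toNat ≤ k →
      PySem.Str.join "" ((solutionLoop n []).reverse) = solution_alt n := by
  intro k
  induction k with
  | zero =>
      intro n hk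
      have hpos : ¬ 0 < n := by omega
      conv_lhs => rw [solutionLoop]
      rw [if_neg hpos, solution_alt, if_pos (by omega)]
      all_goals decide
  | succ k ih =>
      intro n hk
      by_cases hpos : 0 < n
      · have hm : PySem.Int.mod n 3 = n % 3 := PySem.Int.mod_eq_emod_of_pos (by omega)
        have hm' : PySem.Int.mod (n - 1) 3 = (n - 1) % 3 := PySem.Int.mod_eq_emod_of_pos (by omega)
        have hd : PySem.Int.floordiv n 3 = n / 3 := PySem.Int.floordiv_eq_ediv_of_pos (by omega)
        have hd' : PySem.Int.floordiv (n - 1) 3 = (n - 1) / 3 := PySem.Int.floordiv_eq_ediv_of_pos (by omega)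
        rw [solution_alt, if_neg (by omega)]
        conv_lhs => rw [solutionLoop]
        rw [if_pos hpos]
        by_cases hmod : PySem.Int.mod n 3 = 0
        · rw [if_pos hmod, solutionLoop_acc_aux k _ _ (by rw [hd]; omega),
              List.reverse_append, join_empty_append, ih _ (by rw [hd]; omega)]
          rw [hm] at hmod
          have hmod2 : (n - 1) % 3 = 2 := by omega
          have hdiv : (n - 1) / 3 = n / 3 - 1 := by omega
          rw [hm', hmod2, hd', hdiv, hd]
          congr 1
        · rw [if_neg hmod, solutionLoop_acc_aux k _ _ (by rw [hd]; omega),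
              List.reverse_append, join_empty_append, ih _ (by rw [hd]; omega)]
          rw [hm] at hmod
          have hdiv : (n - 1) / 3 = n / 3 := by omega
          rw [hm', hd', hdiv, hd, hm]
          congr 1
          have h12 : n % 3 = 1 ∨ n % 3 = 2 := by omega
          have h2 : (n - 1) % 3 = n % 3 - 1 := by omega
          rcases h12 with h | h <;>
          · rw [h] at h2 ⊢
            rw [h2]
            decide
      · conv_lhs => rw [solutionLoop]
        rw [if_neg hpos, solution_alt, if_pos (by omega)]
        all_goals decide

-- ===== VERDICT (by name: the statement is the Claim_ definition above) =====
theorem solution_spec : Claim_equal_solution := by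
  intro n _
  unfold Spec_solution solution
  exact main_aux n.toNat n le_rfl
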